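-- pv_equiv track=rewrite | github.com/kgrizz-git/DICOMViewerV3 | src/core/mpr_combine_slice_count.py | normalize_mpr_combine_slice_count
-- ===== SOURCE A (Python) =====
-- _ALLOWED_MPR_COMBINE_COUNTS = (2, 3, 4, 6, 8)
--
-- def normalize_mpr_combine_slice_count(n: int) -> int:
--     """Map a requested plane count to the nearest allowed UI value (2–8)."""
--     n = max(2, min(8, int(n)))
--     best = 4
--     best_d = 999
--     for c in _ALLOWED_MPR_COMBINE_COUNTS:
--         d = abs(c - n)
--         if d < best_d:
--             best_d = d
--             best = c
--     return best
-- ===== SOURCE B (Python) =====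
-- _TABLE = {2: 2, 3: 3, 4: 4, 5: 4, 6: 6, 7: 6, 8: 8}
--
-- def normalize_mpr_combine_slice_count(n: int) -> int:
--     return _TABLE[max(2, min(8, int(n)))]
-- ===== Notes on version B (the rewrite author's own statement) =====
-- stated objective: idiomatic
-- what changed: Replaced the distance-scanning loop over allowed counts with a precomputed clamped-value -> nearest-allowed lookup table (encoding the strict-< tie results 5->4 and 7->6) and a single dict lookup.
import Mathlib
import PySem

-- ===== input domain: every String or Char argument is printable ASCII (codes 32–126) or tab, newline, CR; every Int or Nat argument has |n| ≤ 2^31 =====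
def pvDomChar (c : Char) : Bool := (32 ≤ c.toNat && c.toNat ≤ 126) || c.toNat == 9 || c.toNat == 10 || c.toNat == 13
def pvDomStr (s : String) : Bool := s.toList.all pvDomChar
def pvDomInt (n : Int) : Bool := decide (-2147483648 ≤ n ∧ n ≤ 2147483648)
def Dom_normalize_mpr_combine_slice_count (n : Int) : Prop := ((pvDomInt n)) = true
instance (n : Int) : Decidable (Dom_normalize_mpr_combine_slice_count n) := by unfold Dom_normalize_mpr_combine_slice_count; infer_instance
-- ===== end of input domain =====

-- B replaces A's nearest-neighbour distance scan with a precomputed clamp→value lookup table (idiomatic, O(1)).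

-- ===== PORT A =====
def pvAllowedCounts : List Int := [2, 3, 4, 6, 8]

def normalize_mpr_combine_slice_count (n : Int) : Int :=
  let n := max 2 (min 8 n)
  let r := pvAllowedCounts.foldl (fun (st : Int × Int) c =>
    let d := |c - n|
    if d < st.2 then (c, d) else st) (4, 999)
  r.1

-- ===== PORT B =====
def pvTable : PySem.Dict Int Int :=
  PySem.Dict.ofList [(2, 2), (3, 3), (4, 4), (5, 4), (6, 6), (7, 6), (8, 8)]

def normalize_mpr_combine_slice_count_alt (n : Int) : Int :=
  -- _TABLE[clamp]: the clamp guarantees the key is present, so get? is some; default never reached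
  (PySem.Dict.get? pvTable (max 2 (min 8 n))).getD 0

-- ===== PRECONDITION & SPEC =====
def Spec_normalize_mpr_combine_slice_count (n : Int) (out : Int) : Prop := out = normalize_mpr_combine_slice_count_alt n
instance (n : Int) (out : Int) : Decidable (Spec_normalize_mpr_combine_slice_count n out) := by unfold Spec_normalize_mpr_combine_slice_count; infer_instance

-- ===== CLAIM (what is proved, stated in full; the proofs are below) =====
def Claim_equal_normalize_mpr_combine_slice_count : Prop := ∀ (n : Int), Dom_normalize_mpr_combine_slice_count n → Spec_normalize_mpr_combine_slice_count n (normalize_mpr_combine_slice_count n)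

-- ===== LEMMAS AND PROOFS =====
theorem pv_eq_at_clamp (m : Int) (h2 : 2 ≤ m) (h8 : m ≤ 8) :
    normalize_mpr_combine_slice_count m = normalize_mpr_combine_slice_count_alt m := by
  interval_cases m <;> norm_num [normalize_mpr_combine_slice_count, normalize_mpr_combine_slice_count_alt, pvAllowedCounts, pvTable, PySem.Dict.ofList, PySem.Dict.get?] <;> decide

-- ===== VERDICT (by name: the statement is the Claim_ definition above) =====
theorem normalize_mpr_combine_slice_count_spec : Claim_equal_normalize_mpr_combine_slice_count := by
  intro n _
  unfold Spec_normalize_mpr_combine_slice_count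
  have h := pv_eq_at_clamp (max 2 (min 8 n)) (le_max_left _ _) (by omega)
  have hc : max 2 (min 8 (max 2 (min 8 n))) = max 2 (min 8 n) := by omega
  simpa [normalize_mpr_combine_slice_count, normalize_mpr_combine_slice_count_alt, hc] using h
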